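-- pv_equiv track=rewrite | github.com/FabCode67/afritec | word_indecies.py | word_indices
-- ===== SOURCE A (Python) =====
-- def word_indices(sentence):
--     words = sentence.split()
--     indices_dict = {}
--
--     for index, word in enumerate(words):
--         if word in indices_dict:
--             indices_dict[word].append(index)
--         else:
--             indices_dict[word] = [index]
--
--     return indices_dict
-- ===== SOURCE B (Python) =====
-- def word_indices(sentence):
--     words = sentence.split()
--     return {w: [i for i, x in enumerate(words) if x == w]
--             for w in dict.fromkeys(words)}
-- ===== Notes on version B (the rewrite author's own statement) =====
-- stated objective: alternative
-- what changed: Replaces A's single accumulating dict-building pass with a dict comprehension over the first-occurrence-ordered distinct words (dict.fromkeys), computing each word's position list by one enumerate scan per distinct word.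
import Mathlib
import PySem

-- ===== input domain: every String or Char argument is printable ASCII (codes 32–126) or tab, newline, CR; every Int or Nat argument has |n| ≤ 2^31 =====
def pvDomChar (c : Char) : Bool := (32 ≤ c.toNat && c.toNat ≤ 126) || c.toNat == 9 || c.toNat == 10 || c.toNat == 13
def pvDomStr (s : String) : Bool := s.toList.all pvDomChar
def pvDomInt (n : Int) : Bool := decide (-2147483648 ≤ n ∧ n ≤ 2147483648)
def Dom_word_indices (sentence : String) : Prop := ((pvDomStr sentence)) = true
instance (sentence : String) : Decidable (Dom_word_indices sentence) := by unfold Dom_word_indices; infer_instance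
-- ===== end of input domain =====

-- B builds the result as a dict comprehension over the distinct words (one enumerate scan per
-- distinct word) instead of A's single accumulating pass; same cost class, different decomposition.

-- ===== PORT A =====
def word_indices (sentence : String) : List (String × List Int) :=
  let words := PySem.Str.split₀ sentence
  let indicesDict :=
    (PySem.List.enumerate words 0).foldl
      (fun d p =>
        if d.contains p.2 then d.modify p.2 [] (fun l => l ++ [p.1])
        else d.insert p.2 [p.1])
      PySem.Dict.empty
  indicesDict.items

-- ===== PORT B =====
def word_indices_alt (sentence : String) : List (String × List Int) :=
  let words := PySem.Str.split₀ sentence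
  (PySem.List.dedup words).map (fun w =>
    (w, ((PySem.List.enumerate words 0).filter (fun p => p.2 == w)).map (·.1)))

-- ===== PRECONDITION & SPEC =====
def Spec_word_indices (sentence : String) (out : List (String × List Int)) : Prop := out = word_indices_alt sentence
instance (sentence : String) (out : List (String × List Int)) : Decidable (Spec_word_indices sentence out) := by unfold Spec_word_indices; infer_instance

-- ===== CLAIM (what is proved, stated in full; the proofs are below) =====
def Claim_equal_word_indices : Prop := ∀ (sentence : String), Dom_word_indices sentence → Spec_word_indices sentence (word_indices sentence)

-- ===== LEMMAS AND PROOFS =====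

-- A's loop body: the contains-branch is exactly Python's d[k] = d.get(k, []) + [i] (a modify)
theorem pv_body_eq (d : PySem.Dict String (List Int)) (p : Int × String) :
    (if d.contains p.2 then d.modify p.2 [] (fun l => l ++ [p.1])
     else d.insert p.2 [p.1]) = d.modify p.2 [] (fun l => l ++ [p.1]) := by
  by_cases h : d.contains p.2 = true
  · simp [h]
  · simp only [Bool.not_eq_true] at h
    simp [h, PySem.Dict.modify, PySem.Dict.getD_of_not_contains d [] h]

-- The grouping fold's items list IS the per-distinct-word filter map
theorem pv_key_lemma (ws : List String) :
    ((PySem.List.enumerate ws 0).foldl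
      (fun d p => d.modify p.2 [] (fun l => l ++ [p.1])) PySem.Dict.empty).items
    = (PySem.List.dedup ws).map (fun w =>
        (w, ((PySem.List.enumerate ws 0).filter (fun p => p.2 == w)).map (·.1))) := by
  set l := PySem.List.enumerate ws 0 with hl
  set D := l.foldl (fun d p => d.modify p.2 [] (fun l => l ++ [p.1])) PySem.Dict.empty with hD
  have hkeys : D.keys = PySem.Set.ofList ws := by
    rw [hD, PySem.Dict.keys_foldl_modify_key l (fun p => p.2) [] (fun _ p v => v ++ [p.1])
      PySem.Dict.empty]
    rw [hl, PySem.List.map_snd_enumerate]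
    simp [PySem.Set.update, PySem.Set.ofList_eq_foldl]
  have hnd : D.keys.Nodup := hkeys ▸ PySem.Set.nodup_ofList ws
  have hgetD : ∀ w, D.getD w [] = (l.filter (fun p => p.2 == w)).map (·.1) := by
    intro w
    have hswap : D = (l.map (fun p => (p.2, p.1))).foldl
        (fun d q => d.modify q.1 [] (fun v => v ++ [q.2])) PySem.Dict.empty := by
      rw [hD, List.foldl_map]
    rw [hswap, PySem.Dict.getD_foldl_modify_append]
    simp [List.filter_map, List.map_map, Function.comp_def]
  rw [PySem.Dict.items_eq_map_keys D hnd [], hkeys, ← PySem.List.dedup_eq_ofList]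
  exact List.map_congr_left (fun w _ => by rw [hgetD w])

-- ===== VERDICT (by name: the statement is the Claim_ definition above) =====
theorem word_indices_spec : Claim_equal_word_indices := by
  intro s _
  unfold Spec_word_indices word_indices word_indices_alt
  have hbody : (fun (d : PySem.Dict String (List Int)) (p : Int × String) =>
      if d.contains p.2 then d.modify p.2 [] (fun l => l ++ [p.1]) else d.insert p.2 [p.1])
      = fun d p => d.modify p.2 [] (fun l => l ++ [p.1]) :=
    funext fun d => funext fun p => pv_body_eq d p
  simp only [hbody]
  exact pv_key_lemma _
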